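-- pv_equiv track=rewrite | github.com/johnwsh/cod-linha | twoboneq.py | lineEncode
-- ===== SOURCE A (Python) =====
-- def lineEncode(message: str):
--
--     levels = []
--
--     positive = True
--
--     for i in range(0, int(len(message)-1), 2):
--
--         nextBits = message[i:i+2]
--
--         match nextBits:
--             case "00":
--                 if positive:
--                     levels.append(1)
--                     positive = True
--                 else:
--                     levels.append(-1)
--                     positive = False
--             case "01":
--                 if positive:
--                     levels.append(3)
--                     positive = True
--                 else:
--                     levels.append(-3)
--                     positive = False
--             case "10":
--                 if positive:
--                     levels.append(-1)
--                     positive = False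
--                 else:
--                     levels.append(1)
--                     positive = True
--             case "11":
--                 if positive:
--                     levels.append(-3)
--                     positive = False
--                 else:
--                     levels.append(3)
--                     positive = True
--             case _:
--                 raise ValueError("Invalid bit value")
--
--     return levels
-- ===== SOURCE B (Python) =====
-- def lineEncode(message: str):
--     # Staged formulation: split the processed even-length prefix into the two
--     # bit streams, validate once, then compute each level by a closed-form
--     # prefix count of set first bits (no running sign state).
--     m = len(message) // 2
--     bits = message[:2 * m]
--     firsts, seconds = bits[0::2], bits[1::2]
--     if any(c not in "01" for c in firsts + seconds):
--         raise ValueError("Invalid bit value")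
--     return [(-1 if firsts[:k + 1].count("1") % 2 else 1) * (3 if c == "1" else 1)
--             for k, c in enumerate(seconds)]
-- ===== Notes on version B (the rewrite author's own statement) =====
-- stated objective: alternative
-- what changed: B replaces A's stateful pass over four-way-matched pairs by staged passes: stride-slice the message into the first-bit and second-bit streams, validate them once, and compute each level independently by a closed-form prefix count of set first bits (sign) times the second bit's magnitude, with no running polarity state.
import Mathlib
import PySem

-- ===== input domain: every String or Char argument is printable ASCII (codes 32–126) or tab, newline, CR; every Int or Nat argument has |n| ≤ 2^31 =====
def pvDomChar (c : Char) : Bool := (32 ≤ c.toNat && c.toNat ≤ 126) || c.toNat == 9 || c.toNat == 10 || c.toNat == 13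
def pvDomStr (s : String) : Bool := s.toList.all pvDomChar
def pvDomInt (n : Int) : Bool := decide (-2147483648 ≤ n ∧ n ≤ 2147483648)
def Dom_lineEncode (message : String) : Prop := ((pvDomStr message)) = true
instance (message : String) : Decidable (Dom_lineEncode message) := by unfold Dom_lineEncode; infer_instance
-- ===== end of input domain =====

-- B computes each level by stride-splitting the message into the two bit streams
-- and using a closed-form prefix count of set first bits for the sign, instead of
-- A's stateful pass over four-way-matched pairs (objective: alternative).


-- ===== PORT A =====
-- loop `for i in range(0, len-1, 2)`: a pair is taken exactly while ≥ 2 chars remain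
def lineEncodeAux : List Char → Bool → List Int
  | a :: b :: rest, positive =>
    if a = '0' && b = '0' then
      (if positive then (1 : Int) else -1) :: lineEncodeAux rest positive
    else if a = '0' && b = '1' then
      (if positive then (3 : Int) else -3) :: lineEncodeAux rest positive
    else if a = '1' && b = '0' then
      (if positive then (-1 : Int) else 1) :: lineEncodeAux rest (!positive)
    else if a = '1' && b = '1' then
      (if positive then (-3 : Int) else 3) :: lineEncodeAux rest (!positive)
    else []  -- raise ValueError("Invalid bit value"); excluded by Pre_
  | _, _ => []

def lineEncode (message : String) : List Int :=
  lineEncodeAux message.toList true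

-- ===== PORT B =====
-- pyStride2 l = l[0::2], exact: every second element starting at index 0
def pyStride2 : List Char → List Char
  | [] => []
  | [a] => [a]
  | a :: _ :: rest => a :: pyStride2 rest

def lineEncode_alt (message : String) : List Int :=
  let m := message.toList.length / 2
  let bits := message.toList.take (2 * m)
  let firsts := pyStride2 bits          -- bits[0::2]
  let seconds := pyStride2 bits.tail    -- bits[1::2]
  if (firsts ++ seconds).all (fun c => c = '0' || c = '1') then
    (PySem.List.enumerate seconds 0).map (fun kc =>
      (if (firsts.take (kc.1.toNat + 1)).count '1' % 2 = 1 then (-1 : Int) else 1) *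
      (if kc.2 = '1' then 3 else 1))
  else []  -- raise ValueError("Invalid bit value"); excluded by Pre_

-- ===== PRECONDITION & SPEC =====
-- Pre_ excludes exactly the inputs where A raises ValueError: some character in
-- the even-length prefix the loop reads is not a binary digit.
def Pre_lineEncode (message : String) : Prop :=
  (message.toList.take (2 * (message.toList.length / 2))).all
    (fun c => c = '0' || c = '1') = true
instance (message : String) : Decidable (Pre_lineEncode message) := by
  unfold Pre_lineEncode; infer_instance
def pvWitness_lineEncode : String := "10011"
def Spec_lineEncode (message : String) (out : List Int) : Prop := out = lineEncode_alt message
instance (message : String) (out : List Int) : Decidable (Spec_lineEncode message out) := by unfold Spec_lineEncode; infer_instance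

-- ===== CLAIM (what is proved, stated in full; the proofs are below) =====
def Claim_equal_lineEncode : Prop := ∀ (message : String), Dom_lineEncode message → Pre_lineEncode message → Spec_lineEncode message (lineEncode message)

-- ===== LEMMAS AND PROOFS =====

-- recursive characterisation of B's comprehension (proof-only helper):
-- c is the number of set first bits already consumed
def bspec : List Char → List Char → Nat → List Int
  | a :: F, b :: S, c =>
    ((if (c + (if a = '1' then 1 else 0)) % 2 = 1 then (-1 : Int) else 1) *
      (if b = '1' then 3 else 1)) :: bspec F S (c + (if a = '1' then 1 else 0))
  | _, _, _ => []

lemma pyStride2_cons_tail (b : Char) (t : List Char) :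
    pyStride2 (b :: t) = b :: pyStride2 t.tail := by
  cases t <;> rfl

lemma stride2_tail_len : ∀ (t : List Char),
    (pyStride2 t.tail).length ≤ (pyStride2 t).length
  | [] => le_refl _
  | [_] => by simp [pyStride2]
  | a :: b :: r => by
    rw [show (a :: b :: r).tail = b :: r from rfl, pyStride2_cons_tail]
    simpa [pyStride2] using stride2_tail_len r

lemma enum_map_shift {β : Type} : ∀ (S : List Char) (s : Int) (g : Int × Char → β),
    (PySem.List.enumerate S (s + 1)).map g =
      (PySem.List.enumerate S s).map (fun kc => g (kc.1 + 1, kc.2))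
  | [], _, _ => rfl
  | b :: S, s, g => by
    simp only [PySem.List.enumerate_cons, List.map_cons]
    rw [show s + 1 + 1 = (s + 1) + 1 by ring, enum_map_shift S (s + 1) g]

lemma enum_map_eq_bspec : ∀ (S F : List Char) (c : Nat), S.length ≤ F.length →
    (PySem.List.enumerate S 0).map (fun kc =>
      (if (c + (F.take (kc.1.toNat + 1)).count '1') % 2 = 1 then (-1 : Int) else 1) *
      (if kc.2 = '1' then 3 else 1)) = bspec F S c
  | [], F, c, _ => by cases F <;> rfl
  | b :: S, F, c, hlen => by
    obtain ⟨a, F', rfl⟩ : ∃ a F', F = a :: F' := by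
      cases F with
      | nil => simp at hlen
      | cons a F' => exact ⟨a, F', rfl⟩
    have hlen' : S.length ≤ F'.length := by simpa using hlen
    simp only [PySem.List.enumerate_cons, List.map_cons, bspec]
    refine List.cons_eq_cons.mpr ⟨by norm_num [List.count_cons], ?_⟩
    rw [show (0 : Int) + 1 = 0 + 1 from rfl, enum_map_shift]
    rw [← enum_map_eq_bspec S F' (c + (if a = '1' then 1 else 0)) hlen']
    apply List.map_congr_left
    intro kc hkc
    obtain ⟨k, hk, rfl⟩ := (PySem.List.mem_enumerate_iff _ _ _).mp hkc
    have h1 : ((0 : Int) + k + 1).toNat = k + 1 := by omega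
    have h2 : ((0 : Int) + k).toNat = k := by omega
    simp only [h1, h2, List.take_succ_cons, List.count_cons]
    congr 2
    by_cases ha : a = '1' <;> simp [ha] <;> omega

lemma stride2_all (p : Char → Bool) : ∀ (t : List Char),
    (pyStride2 t ++ pyStride2 t.tail).all p = t.all p
  | [] => rfl
  | [a] => by simp [pyStride2]
  | a :: b :: t => by
    have IH := stride2_all p t
    rw [show pyStride2 (a :: b :: t) = a :: pyStride2 t from rfl,
        show (a :: b :: t).tail = b :: t from rfl, pyStride2_cons_tail]
    simp only [List.all_append, List.all_cons, List.all_append] at IH ⊢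
    rw [← IH]
    cases p a <;> cases p b <;> cases (pyStride2 t).all p <;>
      cases (pyStride2 t.tail).all p <;> rfl

-- A's loop equals bspec on the split streams (c tracks consumed set first bits)
lemma aux_eq_bspec : ∀ (l : List Char) (c : Nat),
    (l.take (2 * (l.length / 2))).all (fun c => c = '0' || c = '1') = true →
    lineEncodeAux l (decide (c % 2 = 0)) =
      bspec (pyStride2 (l.take (2 * (l.length / 2))))
        (pyStride2 (l.take (2 * (l.length / 2))).tail) c
  | [], _, _ => by simp [lineEncodeAux, bspec, pyStride2]
  | [a], _, _ => by simp [lineEncodeAux, bspec, pyStride2]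
  | a :: b :: rest, c, h => by
    have hlen : 2 * ((a :: b :: rest).length / 2) = 2 * (rest.length / 2) + 2 := by
      simp [List.length_cons]; omega
    rw [hlen] at h ⊢
    simp only [List.take_succ_cons] at h ⊢
    simp only [List.all_cons, Bool.and_eq_true] at h
    obtain ⟨ha, hb, hrest⟩ := h
    have ha' : a = '0' ∨ a = '1' := by
      rcases Bool.or_eq_true_iff.mp ha with h | h
      · exact Or.inl (by exact_mod_cast of_decide_eq_true h)
      · exact Or.inr (by exact_mod_cast of_decide_eq_true h)
    have hb' : b = '0' ∨ b = '1' := by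
      rcases Bool.or_eq_true_iff.mp hb with h | h
      · exact Or.inl (by exact_mod_cast of_decide_eq_true h)
      · exact Or.inr (by exact_mod_cast of_decide_eq_true h)
    rw [show pyStride2 (a :: b :: rest.take (2 * (rest.length / 2)))
          = a :: pyStride2 (rest.take (2 * (rest.length / 2))) from rfl,
        show (a :: b :: rest.take (2 * (rest.length / 2))).tail
          = b :: rest.take (2 * (rest.length / 2)) from rfl,
        pyStride2_cons_tail]
    have hA := aux_eq_bspec rest c hrest
    have hB := aux_eq_bspec rest (c + 1) hrest
    have heven : decide ((c + 1) % 2 = 0) = !decide (c % 2 = 0) := by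
      by_cases hc : c % 2 = 0 <;> simp [hc] <;> omega
    rcases ha' with rfl | rfl <;> rcases hb' with rfl | rfl <;>
      simp only [bspec, lineEncodeAux] <;>
      by_cases hc : c % 2 = 0 <;>
      [skip; skip; skip; skip; skip; skip; skip; skip] <;>
      first
        | (have hc1 : (c + 1) % 2 = 1 := by omega
           simp [hc, hc1, heven, ← hA, ← hB])
        | (have hc1 : (c + 1) % 2 = 0 := by omega
           have hcn : c % 2 = 1 := by omega
           simp [hc, hc1, hcn, heven, ← hA, ← hB])

-- ===== VERDICT (by name: the statement is the Claim_ definition above) =====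
theorem lineEncode_spec : Claim_equal_lineEncode := by
  intro message _ hpre
  unfold Pre_lineEncode at hpre
  unfold Spec_lineEncode lineEncode lineEncode_alt
  simp only
  rw [if_pos (by rw [stride2_all]; exact hpre)]
  have hmap := enum_map_eq_bspec
    (pyStride2 (message.toList.take (2 * (message.toList.length / 2))).tail)
    (pyStride2 (message.toList.take (2 * (message.toList.length / 2)))) 0
    (stride2_tail_len _)
  simp only [Nat.zero_add] at hmap
  rw [hmap]
  have h := aux_eq_bspec message.toList 0 hpre
  simpa using h
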